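-- pv_equiv track=rewrite | github.com/Sion-Yun/FIT3155_A1 | q1/q1.py | matched_prefix
-- ===== SOURCE A (Python) =====
-- def z_algo(txt: str) -> [int]:
--     """
--     Z-algorithm.
--
--     time complexity:
--         O(n), for n being the length of text.
--     space complexity:
--         O(n), for n being the length of text.
--
--     :argument:
--         txt (str): The text to find z-values.
--     :return: z_arr: array of all z-values.
--     """
--     n = len(txt)  # input string
--     z = [0] * n  # array to store Z-values
--     l, r, k = 0, 0, 0  # left boundary, right boundary, and position of Z-box
--
--     """
--     Computing the Z-values
--         - The set of values Z_i
--         - Z_i = the length of the longest substring, starting at [i] of string, that matches its prefix.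
--     """
--     for i in range(1, n):
--         # Case 1: k is outside the rightmost Z-box
--         if i > r:
--             l, r = i, i
--             while r < n and txt[r - l] == txt[r]:  # explicit comparison
--                 r += 1
--             z[i] = r - l
--             r -= 1
--
--         # Case 2: k is inside the rightmost Z-box
--         else:
--             # Case 2a: Z_k-l+1 box does not extend to the end of the prefix that matches Z_l box
--             k = i - l
--             # Case 2a
--             if z[k] < r - i + 1:
--                 z[i] = z[k]
--
--             # Case 2b: Z_k-l+1 box extends over the prefix that matches Z_l box
--             else:
--                 l = i
--                 while r < n and txt[r - l] == txt[r]: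
--                     r += 1
--                 z[i] = r - l
--                 r -= 1
--     return z  # return all z-values
--
-- def matched_prefix(pat: str):
--     """
--     Creates a matched prefix table of the pattern.
--
--     Time complexity:
--         O(m), for m being the length of pattern.
--     Space complexity:
--         O(m), for the matched prefix list.
--
--     :arg: pat (str): The pattern string.
--     :return: mp_array: A list of the matched prefix of the pattern.
--     """
--     m = len(pat)
--     match_prefixes = [0] * m
--     z_prefix = z_algo(pat)  # Z-prefix list
--
--     # filling the matched prefix array
--     for i in range(m):
--         if (z_prefix[m-i-1] + m-i-1) != m and m-i < m:
--             match_prefixes[m-i-1] = match_prefixes[m-i]  # copy the prefix if no full match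
--         else:
--             match_prefixes[m-i-1] = z_prefix[m-i-1]  # using the z-prefix
--
--     return match_prefixes
-- ===== SOURCE B (Python) =====
-- def matched_prefix(pat: str):
--     # Direct right-to-left fill: mp[j] = m-j when the suffix pat[j:] equals the
--     # prefix pat[:m-j], otherwise inherit mp[j+1]; position 0 copies mp[1]
--     # (matching the z[0] = 0 convention), m == 1 gives [0], empty gives [].
--     m = len(pat)
--     if m == 0:
--         return []
--     if m == 1:
--         return [0]
--     res = [1 if pat[m-1] == pat[0] else 0]
--     for j in range(m-2, 0, -1):
--         res = [(m - j) if pat[j:] == pat[:m-j] else res[0]] + res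
--     return [res[0]] + res
-- ===== Notes on version B (the rewrite author's own statement) =====
-- stated objective: simpler
-- what changed: Drops the Z-algorithm (Z-box maintenance with left/right boundaries) entirely and fills the matched-prefix table directly right-to-left: mp[j] = m-j when pat[j:] == pat[:m-j], else mp[j+1], with mp[0] = mp[1]; the table is built back-to-front by prepending, so no mutable array and no second pass.
import Mathlib
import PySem

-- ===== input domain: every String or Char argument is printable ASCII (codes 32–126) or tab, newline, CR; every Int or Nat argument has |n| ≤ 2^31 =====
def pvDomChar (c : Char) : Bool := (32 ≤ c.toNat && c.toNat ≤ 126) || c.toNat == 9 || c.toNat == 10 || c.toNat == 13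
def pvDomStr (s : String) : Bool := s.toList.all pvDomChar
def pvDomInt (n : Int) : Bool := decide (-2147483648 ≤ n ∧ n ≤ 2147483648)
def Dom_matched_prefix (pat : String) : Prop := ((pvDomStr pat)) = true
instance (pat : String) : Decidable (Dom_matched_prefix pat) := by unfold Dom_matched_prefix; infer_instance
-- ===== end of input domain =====

-- B drops the Z-algorithm and fills the matched-prefix table directly right-to-left
-- (mp[j] = m-j when pat[j:] == pat[:m-j], else mp[j+1]); objective: simpler.

-- ===== PORT A =====
-- the inner `while r < n and txt[r-l] == txt[r]: r += 1` loop of z_algo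
def zExtend (t : List Char) (l : Nat) (r : Nat) : Nat :=
  if h : r < t.length ∧ t.getD (r - l) ' ' = t.getD r ' ' then zExtend t l (r + 1) else r
termination_by t.length - r
decreasing_by omega

-- one iteration of z_algo's `for i in range(1, n)` loop; state = (z, l, r)
def zStep (t : List Char) (st : List Int × Nat × Nat) (i : Nat) : List Int × Nat × Nat :=
  let z := st.1
  let l := st.2.1
  let r := st.2.2
  if r < i then
    -- Case 1: i outside the rightmost Z-box
    let r' := zExtend t i i
    (z.set i ((r' - i : Nat) : Int), i, r' - 1)
  else
    -- Case 2: i inside the rightmost Z-box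
    let k := i - l
    if z.getD k 0 < ((r - i + 1 : Nat) : Int) then
      (z.set i (z.getD k 0), l, r)
    else
      let r' := zExtend t i r
      (z.set i ((r' - i : Nat) : Int), i, r' - 1)

def z_algo (t : List Char) : List Int :=
  ((List.range' 1 (t.length - 1)).foldl (zStep t) (List.replicate t.length (0 : Int), 0, 0)).1

def matched_prefix (pat : String) : List Int :=
  let t := pat.toList
  let m := t.length
  let z := z_algo t
  (List.range m).foldl
    (fun mp i =>
      let j := m - i - 1
      if z.getD j 0 + (j : Int) ≠ (m : Int) ∧ m - i < m then
        mp.set j (mp.getD (j + 1) 0)   -- copy the prefix if no full match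
      else
        mp.set j (z.getD j 0))         -- using the z-prefix
    (List.replicate m (0 : Int))

-- ===== PORT B =====
def matched_prefix_alt (pat : String) : List Int :=
  let t := pat.toList
  let m := t.length
  if m = 0 then []
  else if m = 1 then [0]
  else
    -- for j in range(m-2, 0, -1): res = [m-j if pat[j:] == pat[:m-j] else res[0]] + res
    let res := (List.range' 1 (m - 2)).foldr
      (fun j res =>
        (if t.drop j = t.take (m - j) then ((m - j : Nat) : Int) else res.headD 0) :: res)
      [if t.getD (m - 1) ' ' = t.getD 0 ' ' then (1 : Int) else 0]
    res.headD 0 :: res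

-- ===== PRECONDITION & SPEC =====
def Spec_matched_prefix (pat : String) (out : List Int) : Prop := out = matched_prefix_alt pat
instance (pat : String) (out : List Int) : Decidable (Spec_matched_prefix pat out) := by unfold Spec_matched_prefix; infer_instance

-- ===== CLAIM (what is proved, stated in full; the proofs are below) =====
def Claim_equal_matched_prefix : Prop := ∀ (pat : String), Dom_matched_prefix pat → Spec_matched_prefix pat (matched_prefix pat)

-- ===== LEMMAS AND PROOFS =====

def pvLcp : List Char → List Char → Nat
  | a :: as, b :: bs => if a = b then pvLcp as bs + 1 else 0
  | _, _ => 0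

lemma pvLcp_le_right (a b : List Char) : pvLcp a b ≤ b.length := by
  induction a generalizing b with
  | nil => simp [pvLcp]
  | cons x xs ih =>
    cases b with
    | nil => simp [pvLcp]
    | cons y ys =>
      simp only [pvLcp]
      split <;> simp
      exact ih ys

lemma pvLcp_getD (a b : List Char) (i : Nat) (d : Char) (h : i < pvLcp a b) :
    a.getD i d = b.getD i d := by
  induction a generalizing b i with
  | nil => simp [pvLcp] at h
  | cons x xs ih =>
    cases b with
    | nil => simp [pvLcp] at h
    | cons y ys =>
      simp only [pvLcp] at h
      split at h
      · cases i with
        | zero => simpa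
        | succ i => simpa using ih ys i (by omega)
      · omega

lemma pvLcp_ge (a b : List Char) (v : Nat) (ha : v ≤ a.length) (hb : v ≤ b.length)
    (h : ∀ i, i < v → a.getD i ' ' = b.getD i ' ') : v ≤ pvLcp a b := by
  induction a generalizing b v with
  | nil => simp at ha; omega
  | cons x xs ih =>
    cases b with
    | nil => simp at hb; omega
    | cons y ys =>
      cases v with
      | zero => omega
      | succ v =>
        have hxy : x = y := by simpa using h 0 (by omega)
        simp [pvLcp, hxy]
        have := ih ys v (by simpa using ha) (by simpa using hb)
          (fun i hi => by simpa using h (i+1) (by omega))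
        omega

lemma pvLcp_mismatch (a b : List Char) (ha : pvLcp a b < a.length) (hb : pvLcp a b < b.length) :
    a.getD (pvLcp a b) ' ' ≠ b.getD (pvLcp a b) ' ' := by
  induction a generalizing b with
  | nil => simp at ha
  | cons x xs ih =>
    cases b with
    | nil => simp at hb
    | cons y ys =>
      by_cases hxy : x = y
      · have hl : pvLcp (x::xs) (y::ys) = pvLcp xs ys + 1 := by simp [pvLcp, hxy]
        rw [hl] at ha hb ⊢
        simpa using ih ys (by simpa using ha) (by simpa using hb)
      · have hl : pvLcp (x::xs) (y::ys) = 0 := by simp [pvLcp, hxy]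
        rw [hl]; simpa using hxy

lemma getD_drop (t : List Char) (i j : Nat) (d : Char) : (t.drop i).getD j d = t.getD (i + j) d := by
  simp [List.getD_eq_getElem?_getD, List.getElem?_drop]

lemma getD_take (t : List Char) (k i : Nat) (d : Char) (h : i < k) :
    (t.take k).getD i d = t.getD i d := by
  simp [List.getD_eq_getElem?_getD, h]

lemma list_eq_of_getD (a b : List Char) (h : a.length = b.length)
    (h2 : ∀ i, i < a.length → a.getD i ' ' = b.getD i ' ') : a = b := by
  apply List.ext_getElem h
  intro i h1 h2'
  have := h2 i h1
  simpa [List.getD_eq_getElem?_getD, List.getElem?_eq_getElem, h1, h2'] using this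

lemma lcp_full_iff (t : List Char) (j : Nat) (hj : j ≤ t.length) :
    pvLcp t (t.drop j) = t.length - j ↔ t.drop j = t.take (t.length - j) := by
  constructor
  · intro h
    apply list_eq_of_getD
    · simp
    · intro i hi
      simp only [List.length_drop] at hi
      rw [getD_drop, getD_take t _ _ _ hi]
      have h3 := pvLcp_getD t (t.drop j) i ' ' (by rw [h]; omega)
      rw [getD_drop] at h3
      exact h3.symm
  · intro h
    have hge : t.length - j ≤ pvLcp t (t.drop j) := by
      apply pvLcp_ge _ _ _ (by omega) (by simp)
      intro i hi
      rw [getD_drop] at *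
      conv_lhs => rw [← getD_take t (t.length - j) i ' ' hi]
      rw [← h, getD_drop]
    have hle := pvLcp_le_right t (t.drop j)
    simp at hle
    omega

lemma zExtend_ge (t : List Char) (l r : Nat) : r ≤ zExtend t l r := by
  rw [zExtend]
  split
  · rename_i h
    exact le_trans (by omega) (zExtend_ge t l (r + 1))
  · exact le_refl r
termination_by t.length - r
decreasing_by rename_i h; omega

lemma zExtend_le_length (t : List Char) (l r : Nat) (h : r ≤ t.length) :
    zExtend t l r ≤ t.length := by
  rw [zExtend]
  split
  · rename_i h2
    exact zExtend_le_length t l (r + 1) (by omega)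
  · exact h
termination_by t.length - r
decreasing_by rename_i h2; omega

lemma zExtend_eq (t : List Char) (l r : Nat) (hlr : l ≤ r) (hrn : r ≤ t.length)
    (hbox : ∀ p, p < r - l → t.getD p ' ' = t.getD (l + p) ' ') :
    zExtend t l r = l + pvLcp t (t.drop l) := by
  rw [zExtend]
  split
  · rename_i h
    apply zExtend_eq t l (r + 1) (by omega) (by omega)
    intro p hp
    by_cases hpl : p < r - l
    · exact hbox p hpl
    · have : p = r - l := by omega
      subst this
      rw [Nat.add_sub_cancel' hlr]
      exact h.2
  · rename_i h
    have hge : r - l ≤ pvLcp t (t.drop l) := by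
      apply pvLcp_ge _ _ _ (by omega) (by simp; omega)
      intro i hi
      rw [getD_drop]
      exact hbox i hi
    have hle : pvLcp t (t.drop l) ≤ r - l := by
      by_cases hr : r < t.length
      · have hne : t.getD (r - l) ' ' ≠ t.getD r ' ' := fun he => h ⟨hr, he⟩
        by_contra hc
        push_neg at hc
        apply hne
        have := pvLcp_getD t (t.drop l) (r - l) ' ' hc
        rwa [getD_drop, Nat.add_sub_cancel' hlr] at this
      · have : r = t.length := by omega
        have := pvLcp_le_right t (t.drop l)
        simp at this
        omega
    omega
termination_by t.length - r
decreasing_by rename_i h; omega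

def ZInv (t : List Char) (i : Nat) (st : List Int × Nat × Nat) : Prop :=
  st.1.length = t.length ∧
  (∀ j, 1 ≤ j → j < i → st.1.getD j 0 = (pvLcp t (t.drop j) : Nat)) ∧
  st.1.getD 0 0 = 0 ∧
  st.2.1 < i ∧ st.2.1 ≤ st.2.2 + 1 ∧ st.2.2 < t.length ∧
  (∀ p, p < st.2.2 + 1 - st.2.1 → t.getD p ' ' = t.getD (st.2.1 + p) ' ') ∧
  (1 ≤ st.2.1 ∨ st.2.2 = 0)

lemma getD_set_self (l : List Int) (i : Nat) (v d : Int) (h : i < l.length) :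
    (l.set i v).getD i d = v := by
  simp [List.getD_eq_getElem?_getD, h]

lemma getD_set_ne (l : List Int) (i j : Nat) (v d : Int) (h : j ≠ i) :
    (l.set i v).getD j d = l.getD j d := by
  simp [List.getD_eq_getElem?_getD, List.getElem?_set_ne (by omega : i ≠ j)]

lemma zStep_inv (t : List Char) (i : Nat) (st : List Int × Nat × Nat)
    (h1 : 1 ≤ i) (h2 : i < t.length) (hinv : ZInv t i st) :
    ZInv t (i + 1) (zStep t st i) := by
  obtain ⟨z, l, r⟩ := st
  obtain ⟨hzlen, hzok, hz0, hli, hlr1, hrn, hbox, hl01⟩ := hinv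
  simp only at hzlen hzok hz0 hli hlr1 hrn hbox hl01
  simp only [zStep]
  split
  · -- Case 1: r < i
    have hext := zExtend_eq t i i (le_refl i) (le_of_lt h2) (by intro p hp; omega)
    have hgei : i ≤ zExtend t i i := zExtend_ge t i i
    have hlen : zExtend t i i ≤ t.length := zExtend_le_length t i i (by omega)
    refine ⟨by simpa using hzlen, ?_, ?_, by dsimp only; omega, by dsimp only; omega, by dsimp only; omega, ?_, by dsimp only; omega⟩
    · intro j hj1 hj2
      by_cases hji : j = i
      · subst hji
        simp only
        rw [getD_set_self _ _ _ _ (by omega)]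
        congr 1
        omega
      · simp only
        rw [getD_set_ne _ _ _ _ _ hji]
        exact hzok j hj1 (by omega)
    · simp only
      rw [getD_set_ne _ _ _ _ _ (by omega)]
      exact hz0
    · simp only
      intro p hp
      have hp2 : p < pvLcp t (t.drop i) := by omega
      have := pvLcp_getD t (t.drop i) p ' ' hp2
      rwa [getD_drop] at this
  · -- Case 2: i ≤ r
    rename_i hri
    have hklt : i - l < i := by omega
    have hzk : z.getD (i - l) 0 = (pvLcp t (t.drop (i - l)) : Nat) := hzok (i - l) (by omega) hklt
    split
    · -- Case 2a
      rename_i hlt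
      rw [hzk] at hlt
      have hvlt : pvLcp t (t.drop (i - l)) < r - i + 1 := by exact_mod_cast hlt
      have hvr : pvLcp t (t.drop (i - l)) ≤ r - i := by omega
      have hmain : pvLcp t (t.drop i) = pvLcp t (t.drop (i - l)) := by
        apply le_antisymm
        · have hvn : pvLcp t (t.drop (i - l)) < t.length := by omega
          have hvk : pvLcp t (t.drop (i - l)) < (t.drop (i - l)).length := by simp; omega
          have hmis := pvLcp_mismatch t (t.drop (i - l)) hvn hvk
          rw [getD_drop] at hmis
          have hbv := hbox (i - l + pvLcp t (t.drop (i - l))) (by omega)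
          have e : l + (i - l + pvLcp t (t.drop (i - l))) = i + pvLcp t (t.drop (i - l)) := by omega
          rw [e] at hbv
          by_contra hc
          push_neg at hc
          have hag := pvLcp_getD t (t.drop i) (pvLcp t (t.drop (i - l))) ' ' hc
          rw [getD_drop] at hag
          exact hmis (hag.trans hbv.symm)
        · apply pvLcp_ge _ _ _ (by omega) (by simp; omega)
          intro p hp
          rw [getD_drop]
          have h1p := pvLcp_getD t (t.drop (i - l)) p ' ' hp
          rw [getD_drop] at h1p
          have h2p := hbox (i - l + p) (by omega)
          have e : l + (i - l + p) = i + p := by omega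
          rw [e] at h2p
          exact h1p.trans h2p
      refine ⟨by simpa using hzlen, ?_, ?_, by dsimp only; omega, by simpa using hlr1, by simpa using hrn, by simpa using hbox, by dsimp only; omega⟩
      · intro j hj1 hj2
        by_cases hji : j = i
        · subst hji
          simp only
          rw [getD_set_self _ _ _ _ (by omega), hzk, hmain]
        · simp only
          rw [getD_set_ne _ _ _ _ _ hji]
          exact hzok j hj1 (by omega)
      · simp only
        rw [getD_set_ne _ _ _ _ _ (by omega)]
        exact hz0
    · -- Case 2b
      rename_i hge
      rw [hzk] at hge
      have hvge : r - i + 1 ≤ pvLcp t (t.drop (i - l)) := by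
        push_neg at hge
        exact_mod_cast hge
      have hprec : ∀ p, p < r - i → t.getD p ' ' = t.getD (i + p) ' ' := by
        intro p hp
        have h1p := pvLcp_getD t (t.drop (i - l)) p ' ' (by omega)
        rw [getD_drop] at h1p
        have h2p := hbox (i - l + p) (by omega)
        have e : l + (i - l + p) = i + p := by omega
        rw [e] at h2p
        exact h1p.trans h2p
      have hext := zExtend_eq t i r (by omega) (by omega) hprec
      have hger : r ≤ zExtend t i r := zExtend_ge t i r
      have hlen : zExtend t i r ≤ t.length := zExtend_le_length t i r (by omega)
      refine ⟨by simpa using hzlen, ?_, ?_, by dsimp only; omega, by dsimp only; omega, by dsimp only; omega, ?_, by dsimp only; omega⟩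
      · intro j hj1 hj2
        by_cases hji : j = i
        · subst hji
          simp only
          rw [getD_set_self _ _ _ _ (by omega)]
          congr 1
          omega
        · simp only
          rw [getD_set_ne _ _ _ _ _ hji]
          exact hzok j hj1 (by omega)
      · simp only
        rw [getD_set_ne _ _ _ _ _ (by omega)]
        exact hz0
      · simp only
        intro p hp
        have hp2 : p < pvLcp t (t.drop i) := by omega
        have := pvLcp_getD t (t.drop i) p ' ' hp2
        rwa [getD_drop] at this

lemma zLoop_inv (t : List Char) : ∀ (c a : Nat) (st : List Int × Nat × Nat),
    1 ≤ a → a + c ≤ t.length → ZInv t a st →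
    ZInv t (a + c) ((List.range' a c).foldl (zStep t) st) := by
  intro c
  induction c with
  | zero => intro a st _ _ h; simpa using h
  | succ c ih =>
    intro a st ha hac hinv
    rw [List.range'_succ, List.foldl_cons]
    have := ih (a + 1) (zStep t st a) (by omega) (by omega)
      (zStep_inv t a st ha (by omega) hinv)
    have e : a + (c + 1) = a + 1 + c := by omega
    rw [e]
    exact this

lemma z_algo_spec (t : List Char) :
    (z_algo t).length = t.length ∧ (z_algo t).getD 0 0 = 0 ∧
    ∀ j, 1 ≤ j → j < t.length → (z_algo t).getD j 0 = (pvLcp t (t.drop j) : Nat) := by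
  by_cases hn : t.length ≤ 1
  · have e : t.length - 1 = 0 := by omega
    unfold z_algo
    rw [e]
    refine ⟨by simp, by simp, ?_⟩
    intro j hj1 hj2
    omega
  · have hinit : ZInv t 1 (List.replicate t.length (0 : Int), 0, 0) := by
      refine ⟨by simp, by intro j h1 h2; omega, by simp, by dsimp only; omega, by dsimp only; omega, by dsimp only; omega, ?_, by dsimp only; omega⟩
      intro p hp
      dsimp only at hp ⊢
      have : p = 0 := by omega
      subst this
      rfl
    have h := zLoop_inv t (t.length - 1) 1 _ (by omega) (by omega) hinit
    have e : 1 + (t.length - 1) = t.length := by omega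
    rw [e] at h
    exact ⟨h.1, h.2.2.1, fun j hj1 hj2 => h.2.1 j hj1 hj2⟩

def mpG (t : List Char) (j : Nat) : Int :=
  if _h : t.length ≤ j then 0
  else if t.drop j = t.take (t.length - j) then ((t.length - j : Nat) : Int)
  else mpG t (j + 1)
termination_by t.length - j

def mpH (t : List Char) (j : Nat) : Int := if j = 0 then mpG t 1 else mpG t j

-- where A's branch condition fails, the stored z-value is exactly mpG's value

lemma lcp_cast_eq_mpG (t : List Char) (j : Nat) (h1 : 1 ≤ j) (hj : j < t.length)
    (h : pvLcp t (t.drop j) + j = t.length ∨ j = t.length - 1) :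
    ((pvLcp t (t.drop j) : Nat) : Int) = mpG t j := by
  have hle : pvLcp t (t.drop j) ≤ t.length - j := by
    have := pvLcp_le_right t (t.drop j)
    simpa using this
  rw [mpG]
  rw [dif_neg (by omega)]
  by_cases hd : t.drop j = t.take (t.length - j)
  · rw [if_pos hd]
    have := (lcp_full_iff t j (by omega)).2 hd
    rw [this]
  · rw [if_neg hd]
    have hne : pvLcp t (t.drop j) ≠ t.length - j := fun hc => hd ((lcp_full_iff t j (by omega)).1 hc)
    have hj2 : j = t.length - 1 := by
      rcases h with h | h
      · omega
      · exact h
    have hz : pvLcp t (t.drop j) = 0 := by omega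
    rw [hz, mpG, dif_pos (by omega)]
    simp

lemma set_rep (k : Nat) (L : List Int) (v : Int) :
    ((List.replicate (k + 1) (0 : Int)) ++ L).set k v = List.replicate k 0 ++ v :: L := by
  induction k with
  | zero => simp
  | succ k ih => simpa [List.replicate_succ] using ih

lemma getD_rep_append (k : Nat) (L : List Int) (d : Int) :
    ((List.replicate k (0 : Int)) ++ L).getD k d = L.getD 0 d := by
  simp [List.getD_eq_getElem?_getD, List.getElem?_append_right]

lemma mpA_loop (t : List Char) (hm : 2 ≤ t.length) :
    ∀ i, i ≤ t.length →
      (List.range i).foldl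
        (fun mp i' =>
          let j := t.length - i' - 1
          if (z_algo t).getD j 0 + (j : Int) ≠ (t.length : Int) ∧ t.length - i' < t.length then
            mp.set j (mp.getD (j + 1) 0)
          else
            mp.set j ((z_algo t).getD j 0))
        (List.replicate t.length (0 : Int))
      = List.replicate (t.length - i) 0 ++ (List.range' (t.length - i) i).map (mpH t) := by
  intro i
  induction i with
  | zero => simp
  | succ i ih =>
    intro hi1
    rw [List.range_succ, List.foldl_append, ih (by omega)]
    simp only [List.foldl_cons, List.foldl_nil]
    obtain ⟨hzl, hz0, hzv⟩ := z_algo_spec t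
    have hj1 : t.length - i - 1 + 1 = t.length - i := by omega
    have hread : (List.replicate (t.length - i) (0:Int) ++ (List.range' (t.length - i) i).map (mpH t)).getD (t.length - i - 1 + 1) 0 = mpH t (t.length - i) ∨ i = 0 := by
      by_cases hi0 : i = 0
      · exact Or.inr hi0
      · refine Or.inl ?_
        rw [hj1, getD_rep_append]
        have : i = (i - 1) + 1 := by omega
        rw [this, List.range'_succ]
        simp
    have key : (if (z_algo t).getD (t.length - i - 1) 0 + ((t.length - i - 1 : Nat) : Int) ≠ (t.length : Int) ∧ t.length - i < t.length then
          (List.replicate (t.length - i) (0:Int) ++ (List.range' (t.length - i) i).map (mpH t)).getD (t.length - i - 1 + 1) 0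
        else (z_algo t).getD (t.length - i - 1) 0) = mpH t (t.length - i - 1) := by
      by_cases hi0 : i = 0
      · -- j = t.length - 1 : the second conjunct is False
        subst hi0
        rw [if_neg (by omega)]
        rw [hzv _ (by omega) (by omega)]
        unfold mpH
        rw [if_neg (by omega)]
        exact lcp_cast_eq_mpG t _ (by omega) (by omega) (Or.inr rfl)
      · have hread := hread.resolve_right hi0
        by_cases hj0 : t.length - i - 1 = 0
        · -- j = 0 : z[0] = 0, condition holds, value copies position 1
          rw [hj0] at hread ⊢
          rw [if_pos ⟨by rw [hz0]; push_cast; omega, by omega⟩, hread]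
          have e1 : t.length - i = 1 := by omega
          rw [e1]
          simp [mpH]
        · -- 1 ≤ j ≤ t.length - 2
          rw [hzv _ (by omega) (by omega)]
          have hle : pvLcp t (t.drop (t.length - i - 1)) ≤ t.length - (t.length - i - 1) := by
            have := pvLcp_le_right t (t.drop (t.length - i - 1))
            simpa using this
          by_cases hfull : pvLcp t (t.drop (t.length - i - 1)) + (t.length - i - 1) = t.length
          · rw [if_neg (fun hc => hc.1 (by exact_mod_cast hfull))]
            unfold mpH
            rw [if_neg hj0]
            exact lcp_cast_eq_mpG t _ (by omega) (by omega) (Or.inl hfull)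
          · -- no full match: copy from position j+1
            rw [if_pos ⟨fun hc => hfull (by exact_mod_cast hc), by omega⟩, hread]
            have hd : t.drop (t.length - i - 1) ≠ t.take (t.length - (t.length - i - 1)) := by
              intro hc
              have := (lcp_full_iff t _ (by omega : t.length - i - 1 ≤ t.length)).2 hc
              omega
            have h2 : mpH t (t.length - i) = mpG t (t.length - i) := by
              unfold mpH; rw [if_neg (by omega)]
            have h3 : mpH t (t.length - i - 1) = mpG t (t.length - i - 1) := by
              unfold mpH; rw [if_neg hj0]
            rw [h2, h3]
            conv_rhs => rw [mpG]
            rw [dif_neg (by omega), if_neg hd, hj1]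
    rw [← apply_ite (fun v => (List.replicate (t.length - i) (0:Int) ++ (List.range' (t.length - i) i).map (mpH t)).set (t.length - i - 1) v), key]
    have e2 : List.replicate (t.length - i) (0:Int) = List.replicate ((t.length - i - 1) + 1) 0 := by rw [hj1]
    conv_lhs => rw [e2]
    rw [set_rep]
    have e3 : t.length - (i + 1) = t.length - i - 1 := by omega
    rw [e3, List.range'_succ, hj1]
    simp

lemma take_one_eq (t : List Char) (hm : 1 ≤ t.length) : t.take 1 = [t.getD 0 ' '] := by
  cases t with
  | nil => simp at hm
  | cons x xs => simp

lemma drop_last_eq (t : List Char) (hm : 1 ≤ t.length) :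
    t.drop (t.length - 1) = [t.getD (t.length - 1) ' '] := by
  apply list_eq_of_getD
  · simp; omega
  · intro i hi
    simp only [List.length_drop] at hi
    have : i = 0 := by omega
    subst this
    rw [getD_drop]
    simp

lemma base_eq (t : List Char) (hm : 1 ≤ t.length) :
    (if t.getD (t.length - 1) ' ' = t.getD 0 ' ' then (1 : Int) else 0) = mpG t (t.length - 1) := by
  rw [mpG, dif_neg (by omega)]
  have e : t.length - (t.length - 1) = 1 := by omega
  rw [e, drop_last_eq t hm, take_one_eq t hm]
  have e2 : t.length - 1 + 1 = t.length := by omega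
  by_cases h : t.getD (t.length - 1) ' ' = t.getD 0 ' '
  · rw [if_pos h, if_pos (by rw [h])]; norm_num
  · rw [if_neg h, if_neg (by simpa using h), e2, mpG, dif_pos (le_refl _)]

lemma mpB_fold (t : List Char) (hm : 2 ≤ t.length) :
    ∀ (c a : Nat), a + c = t.length - 1 → 1 ≤ a →
      (List.range' a c).foldr
        (fun j res =>
          (if t.drop j = t.take (t.length - j) then ((t.length - j : Nat) : Int) else res.headD 0) :: res)
        [if t.getD (t.length - 1) ' ' = t.getD 0 ' ' then (1 : Int) else 0]
      = (List.range' a (t.length - a)).map (mpG t) := by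
  intro c
  induction c with
  | zero =>
    intro a ha ha1
    have e : a = t.length - 1 := by omega
    subst e
    have e2 : t.length - (t.length - 1) = 1 := by omega
    rw [e2, List.range'_one, List.range'_zero, List.foldr_nil, List.map_cons, List.map_nil,
      base_eq t (by omega)]
  | succ c ih =>
    intro a ha ha1
    rw [List.range'_succ, List.foldr_cons, ih (a + 1) (by omega) (by omega)]
    have e4 : t.length - (a + 1) = (t.length - (a + 1) - 1) + 1 := by omega
    have hhead : ((List.range' (a + 1) (t.length - (a + 1))).map (mpG t)).headD 0 = mpG t (a + 1) := by
      rw [e4, List.range'_succ]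
      simp
    rw [hhead]
    have e5 : t.length - a = (t.length - (a + 1)) + 1 := by omega
    conv_rhs => rw [e5, List.range'_succ, List.map_cons, mpG]
    rw [dif_neg (by omega)]

-- ===== VERDICT (by name: the statement is the Claim_ definition above) =====
theorem matched_prefix_spec : Claim_equal_matched_prefix := by
  intro pat _
  show matched_prefix pat = matched_prefix_alt pat
  unfold matched_prefix matched_prefix_alt
  simp only
  by_cases h0 : pat.toList.length = 0
  · rw [if_pos h0, h0]
    simp
  · rw [if_neg h0]
    by_cases h1 : pat.toList.length = 1
    · rw [if_pos h1, h1]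
      obtain ⟨_, hz0, _⟩ := z_algo_spec pat.toList
      simp only [List.range_one, List.foldl_cons, List.foldl_nil]
      rw [if_neg (by omega), hz0]
      rfl
    · rw [if_neg h1]
      have hm : 2 ≤ pat.toList.length := by omega
      rw [mpA_loop pat.toList hm pat.toList.length (le_refl _)]
      rw [mpB_fold pat.toList hm (pat.toList.length - 2) 1 (by omega) (by omega)]
      have e6 : pat.toList.length - 1 = (pat.toList.length - 2) + 1 := by omega
      have hhd : ((List.range' 1 (pat.toList.length - 1)).map (mpG pat.toList)).headD 0 = mpG pat.toList 1 := by
        rw [e6, List.range'_succ]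
        simp
      rw [Nat.sub_self, List.replicate_zero, List.nil_append]
      have e7 : pat.toList.length = (pat.toList.length - 1) + 1 := by omega
      conv_lhs => rw [e7, List.range'_succ, List.map_cons]
      rw [hhd]
      have htail : (List.range' 1 (pat.toList.length - 1)).map (mpH pat.toList)
          = (List.range' 1 (pat.toList.length - 1)).map (mpG pat.toList) := by
        apply List.map_congr_left
        intro x hx
        obtain ⟨i, hi, rfl⟩ := List.mem_range'.1 hx
        unfold mpH
        rw [if_neg (by omega)]
      rw [htail]
      congr 1
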